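-- pv_equiv track=rewrite | github.com/cyberbotics/webots | projects/languages/ros/controllers/ros_python/kinetic/dist-packages/catkin/builder.py | _extract_cmake_and_make_arguments
-- ===== SOURCE A (Python) =====
-- def split_arguments(args, splitter_name, default=None):
--     if splitter_name not in args:
--         return args, default
--     index = args.index(splitter_name)
--     return args[0:index], args[index + 1:]
--
-- def _extract_cmake_and_make_arguments(args, extract_catkin_make):
--     cmake_args = []
--     make_args = []
--     catkin_make_args = []
--
--     arg_types = {
--         '--cmake-args': cmake_args,
--         '--make-args': make_args
--     }
--     if extract_catkin_make:
--         arg_types['--catkin-make-args'] = catkin_make_args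
--
--     arg_indexes = {}
--     for k in arg_types.keys():
--         if k in args:
--             arg_indexes[args.index(k)] = k
--
--     for index in reversed(sorted(arg_indexes.keys())):
--         arg_type = arg_indexes[index]
--         args, specific_args = split_arguments(args, arg_type)
--         arg_types[arg_type].extend(specific_args)
--
--     # classify -D* and -G* arguments as cmake specific arguments
--     implicit_cmake_args = [a for a in args if a.startswith('-D') or a.startswith('-G')]
--     args = [a for a in args if a not in implicit_cmake_args]
--
--     return args, implicit_cmake_args + cmake_args, make_args, catkin_make_args
-- ===== SOURCE B (Python) =====
-- def _extract_cmake_and_make_arguments(args, extract_catkin_make):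
--     buckets = {'--cmake-args': [], '--make-args': []}
--     if extract_catkin_make:
--         buckets['--catkin-make-args'] = []
--     remaining = []
--     current = remaining
--     seen = set()
--     for a in args:
--         if a in buckets and a not in seen:
--             seen.add(a)
--             current = buckets[a]
--         else:
--             current.append(a)
--     implicit_cmake_args = [a for a in remaining
--                            if a.startswith('-D') or a.startswith('-G')]
--     rest = [a for a in remaining
--             if not (a.startswith('-D') or a.startswith('-G'))]
--     return (rest, implicit_cmake_args + buckets['--cmake-args'],
--             buckets['--make-args'], buckets.get('--catkin-make-args', []))
-- ===== Notes on version B (the rewrite author's own statement) =====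
-- stated objective: simpler
-- what changed: A locates each splitter with repeated membership/index scans, processes the splitters in reversed sorted index order repeatedly re-splitting the argument list, and finally removes implicit -D/-G cmake args by membership in the collected list; B is a single left-to-right scan that switches a current-destination bucket at the first occurrence of each active splitter token and then partitions the remainder with a direct startswith test.
import Mathlib
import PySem

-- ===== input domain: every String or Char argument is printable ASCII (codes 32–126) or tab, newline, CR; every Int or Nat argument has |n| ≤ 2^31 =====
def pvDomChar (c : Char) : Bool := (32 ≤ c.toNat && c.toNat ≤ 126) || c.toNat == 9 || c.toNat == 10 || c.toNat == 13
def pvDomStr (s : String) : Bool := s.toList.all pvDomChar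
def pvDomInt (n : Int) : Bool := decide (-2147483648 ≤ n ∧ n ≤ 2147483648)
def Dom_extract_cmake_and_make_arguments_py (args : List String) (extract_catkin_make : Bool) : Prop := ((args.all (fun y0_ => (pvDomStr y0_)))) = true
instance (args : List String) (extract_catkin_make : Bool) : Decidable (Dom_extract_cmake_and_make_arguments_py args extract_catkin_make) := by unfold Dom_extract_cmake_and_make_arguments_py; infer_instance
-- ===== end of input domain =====

-- B replaces A's index-collecting / reverse-sorted splitting passes by one left-to-right scan with a
-- current-destination bucket (objective: simpler one-pass structure, same exact results).

-- ===== PORT A =====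
-- split_arguments(args, splitter_name, default=None)
def pvSplit (args : List String) (splitter_name : String) : List String × Option (List String) :=
  if ¬ (args.contains splitter_name) then (args, none)
  else
    match PySem.List.index? args splitter_name with
    | some i => (PySem.List.slice args (some 0) (some (i : Int)),
                 PySem.List.slice args (some ((i : Int) + 1)) none)
    | none => (args, none)

-- arg_types[arg_type].extend(specific_args): the dict values alias the three bucket lists,
-- so extending routes to the bucket named by arg_type (state = (args, cmake, make, catkin)).
def pvExtend (arg_type : String) (st : List String × List String × List String × List String)
    (sp : List String) : List String × List String × List String × List String :=
  if arg_type == "--cmake-args" then (st.1, st.2.1 ++ sp, st.2.2.1, st.2.2.2)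
  else if arg_type == "--make-args" then (st.1, st.2.1, st.2.2.1 ++ sp, st.2.2.2)
  else (st.1, st.2.1, st.2.2.1, st.2.2.2 ++ sp)

-- the body of "for index in reversed(sorted(arg_indexes.keys())):"
def pvAStep (arg_indexes : PySem.Dict Nat String)
    (st : List String × List String × List String × List String) (index : Nat) :
    List String × List String × List String × List String :=
  match PySem.Dict.get? arg_indexes index with
  | some arg_type =>
      match (pvSplit st.1 arg_type).2 with
      | some specific => pvExtend arg_type ((pvSplit st.1 arg_type).1, st.2) specific
      | none => ((pvSplit st.1 arg_type).1, st.2)   -- unreachable: specific_args is never None here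
  | none => st                        -- unreachable: index is a key of arg_indexes

-- the "for k in arg_types.keys(): if k in args: arg_indexes[args.index(k)] = k" loop
def pvBuild (arg_type_keys : List String) (args : List String) : PySem.Dict Nat String :=
  arg_type_keys.foldl (fun d k =>
    if args.contains k then
      match PySem.List.index? args k with
      | some i => PySem.Dict.insert d i k
      | none => d
    else d) PySem.Dict.empty

def extract_cmake_and_make_arguments_py (args : List String) (extract_catkin_make : Bool) :
    List String × List String × List String × List String :=
  let arg_type_keys : List String :=
    ["--cmake-args", "--make-args"] ++ (if extract_catkin_make then ["--catkin-make-args"] else [])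
  let arg_indexes := pvBuild arg_type_keys args
  let st := ((PySem.List.sorted (PySem.Dict.keys arg_indexes) (fun x => x) false).reverse).foldl
      (pvAStep arg_indexes) (args, [], [], [])
  let implicit := st.1.filter (fun a => PySem.Str.startswith a "-D" || PySem.Str.startswith a "-G")
  (st.1.filter (fun a => !(implicit.contains a)), implicit ++ st.2.1, st.2.2.1, st.2.2.2)

-- ===== PORT B =====
-- current.append(a): 'current' aliases one of the buckets, modeled by its name ("" = remaining)
def pvPut (dest : String) (bk : List String × List String × List String × List String)
    (a : String) : List String × List String × List String × List String :=
  if dest == "--cmake-args" then (bk.1, bk.2.1 ++ [a], bk.2.2.1, bk.2.2.2)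
  else if dest == "--make-args" then (bk.1, bk.2.1, bk.2.2.1 ++ [a], bk.2.2.2)
  else if dest == "--catkin-make-args" then (bk.1, bk.2.1, bk.2.2.1, bk.2.2.2 ++ [a])
  else (bk.1 ++ [a], bk.2.1, bk.2.2.1, bk.2.2.2)

-- one step of B's scan; state = (seen, current-destination, (remaining, cmake, make, catkin))
def pvScanStep (actives : List String)
    (st : PySem.Set String × String × (List String × List String × List String × List String))
    (a : String) :
    PySem.Set String × String × (List String × List String × List String × List String) :=
  if actives.contains a && !(PySem.Set.contains st.1 a) then
    (PySem.Set.add st.1 a, a, st.2.2)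
  else (st.1, st.2.1, pvPut st.2.1 st.2.2 a)

def extract_cmake_and_make_arguments_py_alt (args : List String) (extract_catkin_make : Bool) :
    List String × List String × List String × List String :=
  let actives : List String :=
    ["--cmake-args", "--make-args"] ++ (if extract_catkin_make then ["--catkin-make-args"] else [])
  let st := args.foldl (pvScanStep actives) (PySem.Set.empty, "", ([], [], [], []))
  let bk := st.2.2
  let implicit := bk.1.filter (fun a => PySem.Str.startswith a "-D" || PySem.Str.startswith a "-G")
  let rest := bk.1.filter (fun a => !(PySem.Str.startswith a "-D" || PySem.Str.startswith a "-G"))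
  (rest, implicit ++ bk.2.1, bk.2.2.1, bk.2.2.2)

-- ===== PRECONDITION & SPEC =====
def Spec_extract_cmake_and_make_arguments_py (args : List String) (extract_catkin_make : Bool) (out : List String × List String × List String × List String) : Prop := out = extract_cmake_and_make_arguments_py_alt args extract_catkin_make
instance (args : List String) (extract_catkin_make : Bool) (out : List String × List String × List String × List String) : Decidable (Spec_extract_cmake_and_make_arguments_py args extract_catkin_make out) := by unfold Spec_extract_cmake_and_make_arguments_py; infer_instance

-- ===== CLAIM (what is proved, stated in full; the proofs are below) =====
def Claim_equal_extract_cmake_and_make_arguments_py : Prop := ∀ (args : List String) (extract_catkin_make : Bool), Dom_extract_cmake_and_make_arguments_py args extract_catkin_make → Spec_extract_cmake_and_make_arguments_py args extract_catkin_make (extract_cmake_and_make_arguments_py args extract_catkin_make)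

-- ===== LEMMAS AND PROOFS =====

-- the entries of arg_indexes, in insertion order
def pvE (actives args : List String) : List (Nat × String) :=
  actives.filterMap (fun k => (PySem.List.index? args k).map (fun i => (i, k)))

-- k is one of the three splitter names
def pvTriple (k : String) : Prop :=
  k = "--cmake-args" ∨ k = "--make-args" ∨ k = "--catkin-make-args"

theorem pv_mem_E {actives args : List String} {j : Nat} {k : String} :
    (j, k) ∈ pvE actives args ↔ k ∈ actives ∧ PySem.List.index? args k = some j := by
  simp only [pvE, List.mem_filterMap, Option.map_eq_some_iff]
  constructor
  · rintro ⟨a, ha, i, hi, he⟩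
    cases he; exact ⟨ha, hi⟩
  · rintro ⟨ha, hi⟩
    exact ⟨k, ha, j, hi, rfl⟩

theorem pv_idx_get {args : List String} {k : String} {j : Nat}
    (h : PySem.List.index? args k = some j) : ∃ hj : j < args.length, args[j] = k := by
  obtain ⟨hj, h1, _⟩ := PySem.List.getElem_of_index?_eq_some h
  exact ⟨hj, h1⟩

theorem pv_E_inj {args : List String} {j : Nat} {k k' : String}
    (h : PySem.List.index? args k = some j) (h' : PySem.List.index? args k' = some j) :
    k = k' := by
  obtain ⟨hj, e⟩ := pv_idx_get h
  obtain ⟨hj', e'⟩ := pv_idx_get h'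
  rw [← e, ← e']

theorem pv_E_nodup {actives args : List String} (h : actives.Nodup) :
    (pvE actives args).Nodup := by
  apply List.Nodup.filterMap _ h
  intro a a' b hb hb'
  simp only [Option.mem_def, Option.map_eq_some_iff] at hb hb'
  obtain ⟨i, _, he⟩ := hb
  obtain ⟨i', _, he'⟩ := hb'
  cases he; cases he'; rfl

theorem pv_keys_nodup {actives args : List String} (h : actives.Nodup) :
    ((pvE actives args).map Prod.fst).Nodup := by
  apply List.Nodup.map_on _ (pv_E_nodup h)
  rintro ⟨j, k⟩ hm ⟨j', k'⟩ hm' (he : j = j')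
  subst he
  rw [pv_mem_E] at hm hm'
  have := pv_E_inj hm.2 hm'.2
  simp [this]

theorem pv_build_go (args : List String) : ∀ (ks : List String) (d : PySem.Dict Nat String),
    ks.Nodup →
    (∀ k ∈ ks, ∀ j : Nat, PySem.List.index? args k = some j → d.contains j = false) →
    (ks.foldl (fun d k =>
      if args.contains k then
        match PySem.List.index? args k with
        | some i => PySem.Dict.insert d i k
        | none => d
      else d) d).items = d.items ++ pvE ks args := by
  intro ks
  induction ks with
  | nil => intro d _ _; simp [pvE]
  | cons k rest ih =>
    intro d hnd hfresh
    by_cases hc : args.contains k = true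
    · have hk : k ∈ args := by rwa [List.contains_iff_mem] at hc
      obtain ⟨i, hi⟩ := Option.isSome_iff_exists.1 ((PySem.List.index?_isSome_iff args k).2 hk)
      rw [List.foldl_cons]
      simp only [hc, if_true, hi]
      rw [ih (d.insert i k) hnd.of_cons ?fresh]
      · rw [PySem.Dict.items_insert_of_not_contains d k (hfresh k (by simp) i hi)]
        simp only [pvE, List.filterMap_cons, hi, Option.map_some, List.append_assoc,
          List.cons_append, List.nil_append]
      case fresh =>
        intro k' hk' j hj
        rw [PySem.Dict.contains_insert]
        have hji : j ≠ i := by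
          intro he; subst he
          have : k' = k := pv_E_inj hj hi
          subst this
          exact (List.nodup_cons.1 hnd).1 hk'
        have hb : (j == i) = false := by simpa using hji
        rw [hb, Bool.false_or]
        exact hfresh k' (List.mem_cons_of_mem _ hk') j hj
    · have hk : k ∉ args := by
        intro hmem
        exact hc (by rwa [List.contains_iff_mem])
      have hnone : PySem.List.index? args k = none := (PySem.List.index?_eq_none_iff args k).2 hk
      rw [List.foldl_cons]
      rw [if_neg hc]
      rw [ih d hnd.of_cons (fun k' hk' => hfresh k' (List.mem_cons_of_mem _ hk'))]
      simp only [pvE, List.filterMap_cons, hnone, Option.map_none]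

theorem pv_build_items (actives args : List String) (h : actives.Nodup) :
    (pvBuild actives args).items = pvE actives args := by
  unfold pvBuild
  rw [pv_build_go args actives PySem.Dict.empty h
      (by intro k _ j _; exact PySem.Dict.contains_empty j)]
  simp [PySem.Dict.empty]

theorem pv_build_keys (actives args : List String) (h : actives.Nodup) :
    (pvBuild actives args).keys = (pvE actives args).map Prod.fst := by
  simp only [PySem.Dict.keys, pv_build_items actives args h]

theorem pv_build_get? (actives args : List String) (h : actives.Nodup) {j : Nat} {k : String}
    (hm : (j, k) ∈ pvE actives args) : (pvBuild actives args).get? j = some k :=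
  PySem.Dict.get?_of_mem_items _ (by rw [pv_build_items _ _ h]; exact hm)
    (by rw [pv_build_keys _ _ h]; exact pv_keys_nodup h)

theorem pv_exists_max : ∀ (K : List Nat), K ≠ [] → ∃ i ∈ K, ∀ j ∈ K, j ≤ i := by
  intro K
  induction K with
  | nil => simp
  | cons a t ih =>
    intro _
    by_cases ht : t = []
    · subst ht; exact ⟨a, by simp, by simp⟩
    · obtain ⟨i, hi, hmax⟩ := ih ht
      rcases le_total a i with h | h
      · refine ⟨i, by simp [hi], ?_⟩
        intro j hj
        rcases List.mem_cons.1 hj with rfl | hj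
        · exact h
        · exact hmax j hj
      · refine ⟨a, by simp, ?_⟩
        intro j hj
        rcases List.mem_cons.1 hj with rfl | hj
        · exact le_rfl
        · exact le_trans (hmax j hj) h

theorem pv_desc_max (K : List Nat) (hnd : K.Nodup) (i : Nat) (hi : i ∈ K)
    (hmax : ∀ j ∈ K, j ≤ i) :
    (PySem.List.sorted K (fun x => x) false).reverse
      = i :: (PySem.List.sorted (K.erase i) (fun x => x) false).reverse := by
  have h1 : PySem.List.sorted K (fun x => x) false
      = (PySem.List.sorted (K.erase i) (fun x => x) false) ++ [i] := by
    apply PySem.List.sorted_eq_of_perm_of_pairwise_lt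
    · exact ((List.perm_append_singleton _ _).trans
        ((PySem.List.sorted_perm _ _ _).cons i)).trans (List.perm_cons_erase hi).symm
    · rw [List.pairwise_append]
      refine ⟨?_, List.pairwise_singleton _ _, ?_⟩
      · have hle := PySem.List.sorted_pairwise (K.erase i) (fun x => x)
        have hnd' : (PySem.List.sorted (K.erase i) (fun x => x) false).Nodup :=
          (PySem.List.sorted_perm _ _ _).nodup_iff.2 (hnd.erase i)
        exact (hle.and hnd').imp (fun h => lt_of_le_of_ne h.1 h.2)
      · intro a ha b hb
        simp only [List.mem_singleton] at hb
        subst hb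
        rw [PySem.List.mem_sorted] at ha
        exact lt_of_le_of_ne (hmax a (List.mem_of_mem_erase ha))
          (fun he => hnd.not_mem_erase (he ▸ ha))
  rw [h1]; simp

theorem pv_fold_congr (D D' : PySem.Dict Nat String) :
    ∀ (L : List Nat) (st : List String × List String × List String × List String),
    (∀ j ∈ L, D.get? j = D'.get? j) →
    L.foldl (pvAStep D) st = L.foldl (pvAStep D') st := by
  intro L
  induction L with
  | nil => intro st _; rfl
  | cons j rest ih =>
    intro st h
    rw [List.foldl_cons, List.foldl_cons]
    have hstep : pvAStep D st j = pvAStep D' st j := by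
      unfold pvAStep; rw [h j (by simp)]
    rw [hstep, ih _ (fun j' hj' => h j' (by simp [hj']))]

theorem pv_extend_fst (s : String)
    (st : List String × List String × List String × List String) (q : List String) :
    (pvExtend s st q).1 = st.1 := by
  unfold pvExtend; split_ifs <;> rfl

theorem pv_extend_comm {k s : String} (hk : pvTriple k) (hs : pvTriple s) (hne : k ≠ s)
    (st : List String × List String × List String × List String) (sp q : List String) :
    pvExtend k (pvExtend s st q) sp = pvExtend s (pvExtend k st sp) q := by
  rcases hk with rfl | rfl | rfl <;> rcases hs with rfl | rfl | rfl <;> simp_all [pvExtend]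

theorem pv_extend_snd_ext (s : String)
    (st : List String × List String × List String × List String)
    (r : List String) (q : List String) :
    ((r, (pvExtend s st q).2) : List String × List String × List String × List String)
      = pvExtend s (r, st.2) q := by
  unfold pvExtend; split_ifs <;> rfl

theorem pv_step_ext (D : PySem.Dict Nat String) (j : Nat) (s : String)
    (st : List String × List String × List String × List String) (q : List String)
    (h : ∀ k, D.get? j = some k → pvTriple k ∧ pvTriple s ∧ k ≠ s) :
    pvAStep D (pvExtend s st q) j = pvExtend s (pvAStep D st j) q := by
  unfold pvAStep
  cases hD : D.get? j with
  | none => rfl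
  | some k =>
    obtain ⟨hk, hs, hne⟩ := h k hD
    dsimp only
    rw [pv_extend_fst]
    cases h2 : (pvSplit st.1 k).2 with
    | none => exact pv_extend_snd_ext s st _ q
    | some sp =>
      dsimp only
      rw [show ((pvSplit st.1 k).1, (pvExtend s st q).2) = pvExtend s ((pvSplit st.1 k).1, st.2) q
        from pv_extend_snd_ext s st _ q, pv_extend_comm hk hs hne]

theorem pv_fold_ext (D : PySem.Dict Nat String) (s : String) :
    ∀ (L : List Nat) (st : List String × List String × List String × List String)
      (q : List String),
    (∀ j ∈ L, ∀ k, D.get? j = some k → pvTriple k ∧ pvTriple s ∧ k ≠ s) →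
    L.foldl (pvAStep D) (pvExtend s st q) = pvExtend s (L.foldl (pvAStep D) st) q := by
  intro L
  induction L with
  | nil => intro st q _; rfl
  | cons j rest ih =>
    intro st q h
    rw [List.foldl_cons, List.foldl_cons, pv_step_ext D j s st q (h j (by simp)),
      ih _ q (fun j' hj' => h j' (by simp [hj']))]

theorem pv_scan_seen (actives : List String) :
    ∀ (l : List String)
      (st : PySem.Set String × String × (List String × List String × List String × List String))
      (x : String),
    x ∈ (l.foldl (pvScanStep actives) st).1 ↔ x ∈ st.1 ∨ (x ∈ l ∧ x ∈ actives) := by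
  intro l
  induction l with
  | nil => simp
  | cons a rest ih =>
    intro st x
    rw [List.foldl_cons]
    by_cases hcond : (actives.contains a && !(PySem.Set.contains st.1 a)) = true
    · have ha : a ∈ actives := by
        rw [Bool.and_eq_true, List.contains_iff_mem] at hcond
        exact hcond.1
      rw [show pvScanStep actives st a = (PySem.Set.add st.1 a, a, st.2.2) by
        unfold pvScanStep; rw [if_pos hcond]]
      rw [ih]
      simp only [PySem.Set.mem_add, List.mem_cons]
      constructor
      · rintro (⟨h | rfl⟩ | ⟨h1, h2⟩)
        · exact Or.inl h
        · exact Or.inr ⟨Or.inl rfl, ha⟩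
        · exact Or.inr ⟨Or.inr h1, h2⟩
      · rintro (h | ⟨rfl | h1, h2⟩)
        · exact Or.inl (Or.inl h)
        · exact Or.inl (Or.inr rfl)
        · exact Or.inr ⟨h1, h2⟩
    · have ha : a ∉ actives ∨ a ∈ st.1 := by
        rw [Bool.and_eq_true, not_and_or] at hcond
        rcases hcond with h | h
        · left; intro hm
          exact h (by rwa [List.contains_iff_mem])
        · right
          rw [Bool.not_eq_true, Bool.not_eq_false'] at h
          exact (PySem.Set.contains_iff _ _).1 h
      rw [show pvScanStep actives st a = (st.1, st.2.1, pvPut st.2.1 st.2.2 a) by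
        unfold pvScanStep; rw [if_neg hcond]]
      rw [ih]
      simp only [List.mem_cons]
      constructor
      · rintro (h | ⟨h1, h2⟩)
        · exact Or.inl h
        · exact Or.inr ⟨Or.inr h1, h2⟩
      · rintro (h | ⟨rfl | h1, h2⟩)
        · exact Or.inl h
        · rcases ha with h | h
          · exact absurd h2 h
          · exact Or.inl h
        · exact Or.inr ⟨h1, h2⟩

theorem pv_scan_flush (actives : List String) :
    ∀ (l : List String)
      (st : PySem.Set String × String × (List String × List String × List String × List String)),
    (∀ a ∈ l, a ∈ actives → a ∈ st.1) →
    l.foldl (pvScanStep actives) st = (st.1, st.2.1, l.foldl (pvPut st.2.1) st.2.2) := by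
  intro l
  induction l with
  | nil => intro st _; rfl
  | cons a rest ih =>
    intro st h
    have hcond : ¬ ((actives.contains a && !(PySem.Set.contains st.1 a)) = true) := by
      rw [Bool.and_eq_true, not_and_or]
      by_cases ha : a ∈ actives
      · right
        have := h a (by simp) ha
        simp [this]
      · left
        simp [ha]
    rw [List.foldl_cons, show pvScanStep actives st a = (st.1, st.2.1, pvPut st.2.1 st.2.2 a) by
      unfold pvScanStep; rw [if_neg hcond]]
    rw [ih (st.1, st.2.1, pvPut st.2.1 st.2.2 a) (fun b hb hba => h b (by simp [hb]) hba)]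
    rfl

theorem pv_put_extend (d : String) (hd : pvTriple d) :
    ∀ (l : List String) (bk : List String × List String × List String × List String),
    l.foldl (pvPut d) bk = pvExtend d bk l := by
  intro l
  induction l with
  | nil =>
    intro bk
    rcases hd with rfl | rfl | rfl <;> simp [pvExtend]
  | cons a rest ih =>
    intro bk
    rw [List.foldl_cons, ih]
    rcases hd with rfl | rfl | rfl <;> simp [pvExtend, pvPut]

theorem pv_put_empty :
    ∀ (l : List String) (bk : List String × List String × List String × List String),
    l.foldl (pvPut "") bk = (bk.1 ++ l, bk.2.1, bk.2.2.1, bk.2.2.2) := by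
  intro l
  induction l with
  | nil => intro bk; simp
  | cons a rest ih =>
    intro bk
    rw [List.foldl_cons, ih]
    simp [pvPut]

theorem pv_base (actives args : List String) (hnd : actives.Nodup)
    (hE : pvE actives args = []) :
    ((PySem.List.sorted (PySem.Dict.keys (pvBuild actives args)) (fun x => x) false).reverse).foldl
        (pvAStep (pvBuild actives args)) (args, [], [], [])
      = (args.foldl (pvScanStep actives) (PySem.Set.empty, "", ([], [], [], []))).2.2 := by
  rw [pv_build_keys _ _ hnd, hE, List.map_nil]
  rw [show PySem.List.sorted ([] : List Nat) (fun x => x) false = [] from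
    (PySem.List.sorted_eq_nil_iff _ _ _).2 rfl]
  rw [pv_scan_flush actives args _ ?none]
  · dsimp only
    rw [pv_put_empty]
    simp
  case none =>
    intro a ha hact
    exfalso
    obtain ⟨j, hj⟩ := Option.isSome_iff_exists.1 ((PySem.List.index?_isSome_iff args a).2 ha)
    have : (j, a) ∈ pvE actives args := pv_mem_E.2 ⟨hact, hj⟩
    rw [hE] at this
    simp at this

theorem pvE_append (u v args : List String) :
    pvE (u ++ v) args = pvE u args ++ pvE v args := by
  simp [pvE]

theorem pvE_cons_of_some {args : List String} {k : String} {j : Nat} (v : List String)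
    (h : PySem.List.index? args k = some j) :
    pvE (k :: v) args = (j, k) :: pvE v args := by
  simp only [pvE, List.filterMap_cons, h, Option.map_some]

theorem pvE_cons_of_none {args : List String} {k : String} (v : List String)
    (h : PySem.List.index? args k = none) :
    pvE (k :: v) args = pvE v args := by
  simp only [pvE, List.filterMap_cons, h, Option.map_none]

theorem pv_main (actives : List String) (hnd : actives.Nodup)
    (htr : ∀ x ∈ actives, x = "--cmake-args" ∨ x = "--make-args" ∨ x = "--catkin-make-args") :
    ∀ (args : List String),
      ((PySem.List.sorted (PySem.Dict.keys (pvBuild actives args)) (fun x => x) false).reverse).foldl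
          (pvAStep (pvBuild actives args)) (args, [], [], [])
        = (args.foldl (pvScanStep actives) (PySem.Set.empty, "", ([], [], [], []))).2.2 := by
  suffices H : ∀ (n : Nat) (args : List String), args.length ≤ n →
      ((PySem.List.sorted (PySem.Dict.keys (pvBuild actives args)) (fun x => x) false).reverse).foldl
          (pvAStep (pvBuild actives args)) (args, [], [], [])
        = (args.foldl (pvScanStep actives) (PySem.Set.empty, "", ([], [], [], []))).2.2 by
    intro args; exact H args.length args le_rfl
  intro n
  induction n with
  | zero =>
    intro args hlen
    have hargs : args = [] := List.eq_nil_of_length_eq_zero (Nat.le_zero.1 hlen)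
    subst hargs
    apply pv_base actives [] hnd
    simp [pvE]
  | succ n ih =>
    intro args hlen
    by_cases hE : pvE actives args = []
    · exact pv_base actives args hnd hE
    · have hKne : (pvE actives args).map Prod.fst ≠ [] := by simpa using hE
      obtain ⟨i, hiK, hmaxK⟩ := pv_exists_max _ hKne
      have hmax' : ∀ (j : Nat) (k : String), (j, k) ∈ pvE actives args → j ≤ i :=
        fun j k hm => hmaxK j (List.mem_map.2 ⟨(j, k), hm, rfl⟩)
      obtain ⟨⟨i', s⟩, hmemE, hfst⟩ := List.mem_map.1 hiK
      simp only at hfst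
      subst hfst
      obtain ⟨hsact, hidx⟩ := pv_mem_E.1 hmemE
      obtain ⟨pre, suf, hargs, hlenpre, hspre⟩ := (PySem.List.index?_eq_some_iff _ _ _).1 hidx
      subst hlenpre
      subst hargs
      have hsargs : s ∈ pre ++ s :: suf := by simp
      -- F1: every active name other than s has the same first index in args and in pre
      have F1 : ∀ k, k ∈ actives → k ≠ s →
          PySem.List.index? (pre ++ s :: suf) k = PySem.List.index? pre k := by
        intro k hka hks
        by_cases hkp : k ∈ pre
        · exact PySem.List.index?_append_of_mem _ hkp
        · have hknil : k ∉ pre ++ s :: suf := by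
            intro hkargs
            obtain ⟨j, hj⟩ := Option.isSome_iff_exists.1
              ((PySem.List.index?_isSome_iff _ k).2 hkargs)
            have hle : j ≤ pre.length := hmax' j k (pv_mem_E.2 ⟨hka, hj⟩)
            obtain ⟨hjlt, hgetj⟩ := pv_idx_get hj
            rcases lt_or_eq_of_le hle with hlt | heq
            · apply hkp
              have e1 : (pre ++ s :: suf)[j] = pre[j]'hlt := List.getElem_append_left hlt
              rw [← hgetj, e1]
              exact List.getElem_mem _
            · subst heq
              obtain ⟨hilt, hgeti⟩ := pv_idx_get hidx
              apply hks
              rw [← hgetj]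
              exact hgeti
          rw [(PySem.List.index?_eq_none_iff _ _).2 hknil,
            (PySem.List.index?_eq_none_iff _ _).2 hkp]
      -- split actives around s
      obtain ⟨u, w, hUW⟩ := List.append_of_mem hsact
      have hndUW : (u ++ s :: w).Nodup := hUW ▸ hnd
      have hsu : s ∉ u := by
        intro hmem
        exact (List.nodup_append.1 hndUW).2.2 s hmem s List.mem_cons_self rfl
      have hEu : pvE u (pre ++ s :: suf) = pvE u pre := by
        apply List.filterMap_congr
        intro k hk
        rw [F1 k (by rw [hUW]; exact List.mem_append_left _ hk) (fun he => hsu (he ▸ hk))]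
      have hEw : pvE w (pre ++ s :: suf) = pvE w pre := by
        apply List.filterMap_congr
        intro k hk
        have hkw : k ≠ s := by
          rintro rfl
          exact ((List.nodup_cons.1 (List.nodup_append.1 hndUW).2.1).1) hk
        rw [F1 k (by rw [hUW]; exact List.mem_append_right _ (List.mem_cons_of_mem _ hk)) hkw]
      have hEargs : pvE actives (pre ++ s :: suf) = pvE u pre ++ (pre.length, s) :: pvE w pre := by
        rw [hUW, pvE_append, pvE_cons_of_some _ hidx, hEu, hEw]
      have hspre' : PySem.List.index? pre s = none := (PySem.List.index?_eq_none_iff _ _).2 hspre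
      have hEpre : pvE actives pre = pvE u pre ++ pvE w pre := by
        rw [hUW, pvE_append, pvE_cons_of_none _ hspre']
      -- keys
      have hKnodup := pv_keys_nodup (args := pre ++ s :: suf) hnd
      have hKargs : (pvE actives (pre ++ s :: suf)).map Prod.fst
          = (pvE u pre).map Prod.fst ++ pre.length :: (pvE w pre).map Prod.fst := by
        rw [hEargs]; simp
      have hiA : pre.length ∉ (pvE u pre).map Prod.fst := by
        rw [hKargs] at hKnodup
        intro hmem
        exact (List.nodup_append.1 hKnodup).2.2 pre.length hmem pre.length List.mem_cons_self rfl
      have hKerase : ((pvE actives (pre ++ s :: suf)).map Prod.fst).erase pre.length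
          = (pvE actives pre).map Prod.fst := by
        rw [hKargs, List.erase_append_right _ hiA, List.erase_cons_head, hEpre]
        simp
      -- the top (maximal-index) step of A's loop
      have hcontains : (pre ++ s :: suf).contains s = true := by
        rw [List.contains_iff_mem]; exact hsargs
      have hstep : pvAStep (pvBuild actives (pre ++ s :: suf)) (pre ++ s :: suf, [], [], [])
            pre.length = pvExtend s (pre, ([], [], [])) suf := by
        unfold pvAStep
        rw [pv_build_get? _ _ hnd hmemE]
        dsimp only
        unfold pvSplit
        rw [if_neg (not_not_intro hcontains), hidx]
        dsimp only
        rw [PySem.List.slice_zero_start, PySem.List.slice_to_natCast, List.take_left]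
        rw [show ((pre.length : Int) + 1) = ((pre.length + 1 : Nat) : Int) by push_cast; ring]
        rw [PySem.List.slice_from_natCast,
          show pre ++ s :: suf = (pre ++ [s]) ++ suf by simp,
          List.drop_left' (by simp)]
      -- facts about members of the remaining (smaller-index) entries
      have hmemPre : ∀ {j : Nat} {k : String}, (j, k) ∈ pvE actives pre →
          k ∈ actives ∧ k ∈ pre ∧ (j, k) ∈ pvE actives (pre ++ s :: suf) := by
        intro j k hm
        obtain ⟨hka, hjk⟩ := pv_mem_E.1 hm
        refine ⟨hka, ?_, ?_⟩
        · exact (PySem.List.index?_isSome_iff _ _).1 (by rw [hjk]; rfl)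
        · rw [hEargs]
          rw [hEpre] at hm
          rcases List.mem_append.1 hm with h | h
          · exact List.mem_append_left _ h
          · exact List.mem_append_right _ (List.mem_cons_of_mem _ h)
      -- rewrite A's side
      rw [pv_build_keys _ _ hnd,
        pv_desc_max _ hKnodup pre.length hiK hmaxK, hKerase,
        ← pv_build_keys actives pre hnd, List.foldl_cons, hstep]
      rw [pv_fold_congr (pvBuild actives (pre ++ s :: suf)) (pvBuild actives pre) _ _ ?congr]
      case congr =>
        intro j hj
        rw [List.mem_reverse, PySem.List.mem_sorted, pv_build_keys _ _ hnd] at hj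
        obtain ⟨⟨j', k⟩, hmE, hfst⟩ := List.mem_map.1 hj
        simp only at hfst
        subst hfst
        obtain ⟨_, _, hmA⟩ := hmemPre hmE
        rw [pv_build_get? _ _ hnd hmA, pv_build_get? _ _ hnd hmE]
      rw [pv_fold_ext (pvBuild actives pre) s _ (pre, ([], [], [])) suf ?disj]
      case disj =>
        intro j hj k hk
        rw [List.mem_reverse, PySem.List.mem_sorted, pv_build_keys _ _ hnd] at hj
        obtain ⟨⟨j', k0⟩, hmE, hfst⟩ := List.mem_map.1 hj
        simp only at hfst
        subst hfst
        have hk0 : k = k0 := by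
          have := pv_build_get? _ _ hnd hmE
          rw [hk] at this
          exact Option.some_inj.1 this
        subst hk0
        obtain ⟨hka, hkp, _⟩ := hmemPre hmE
        exact ⟨htr k hka, htr s hsact, fun he => hspre (he ▸ hkp)⟩
      have hlenpre' : pre.length ≤ n := by
        have := hlen
        simp only [List.length_append, List.length_cons] at this
        omega
      rw [ih pre hlenpre']
      -- rewrite B's side
      rw [List.foldl_append, List.foldl_cons]
      have hseenpre : s ∉ (pre.foldl (pvScanStep actives)
          (PySem.Set.empty, "", ([], [], [], []))).1 := by
        rw [pv_scan_seen]
        rintro (h | ⟨h, _⟩)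
        · simp [PySem.Set.empty] at h
        · exact hspre h
      have hscan_s : pvScanStep actives
            (pre.foldl (pvScanStep actives) (PySem.Set.empty, "", ([], [], [], []))) s
          = (PySem.Set.add (pre.foldl (pvScanStep actives)
                (PySem.Set.empty, "", ([], [], [], []))).1 s, s,
             (pre.foldl (pvScanStep actives) (PySem.Set.empty, "", ([], [], [], []))).2.2) := by
        unfold pvScanStep
        rw [if_pos]
        rw [Bool.and_eq_true]
        refine ⟨(List.contains_iff_mem).2 hsact, ?_⟩
        rw [Bool.not_eq_eq_eq_not, Bool.not_true, ← Bool.not_eq_true]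
        intro hc
        exact hseenpre ((PySem.Set.contains_iff _ _).1 hc)
      rw [hscan_s]
      rw [pv_scan_flush actives suf _ ?flush]
      case flush =>
        intro a ha hact2
        dsimp only
        rw [PySem.Set.mem_add]
        by_cases has : a = s
        · exact Or.inr has
        · left
          have haargs : a ∈ pre ++ s :: suf := by simp [ha]
          obtain ⟨j, hj⟩ := Option.isSome_iff_exists.1
            ((PySem.List.index?_isSome_iff _ a).2 haargs)
          have hle : j ≤ pre.length := hmax' j a (pv_mem_E.2 ⟨hact2, hj⟩)
          have hjlt : j < pre.length := by
            rcases lt_or_eq_of_le hle with h | h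
            · exact h
            · exfalso; apply has
              exact pv_E_inj hj (h ▸ hidx)
          obtain ⟨hjlt', hgetj⟩ := pv_idx_get hj
          have hapre : a ∈ pre := by
            have e1 : (pre ++ s :: suf)[j] = pre[j]'hjlt := List.getElem_append_left hjlt
            rw [← hgetj, e1]
            exact List.getElem_mem _
          rw [pv_scan_seen]
          exact Or.inr ⟨hapre, hact2⟩
      dsimp only
      rw [pv_put_extend s (htr s hsact)]

theorem pv_filter_filter (l : List String) (p : String → Bool) :
    l.filter (fun a => !((l.filter p).contains a)) = l.filter (fun a => !(p a)) := by
  apply List.filter_congr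
  intro a ha
  simp [List.mem_filter, ha]

-- ===== VERDICT (by name: the statement is the Claim_ definition above) =====
theorem extract_cmake_and_make_arguments_py_spec : Claim_equal_extract_cmake_and_make_arguments_py := by
  intro args ecm _
  unfold Spec_extract_cmake_and_make_arguments_py
  unfold extract_cmake_and_make_arguments_py extract_cmake_and_make_arguments_py_alt
  dsimp only
  rw [pv_main _ (by cases ecm <;> decide) (by cases ecm <;> decide) args]
  rw [pv_filter_filter]
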